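-- pv_equiv track=rewrite | github.com/shengchaohua/leetcode-solution | leetcode solution in python/NondecreasingArray.py | checkPossibility2
-- ===== SOURCE A (Python) =====
-- def checkPossibility2(nums):
--     # Locate and Analyze Problem Index
--     p = None
--     for i in range(len(nums) - 1):
--         if nums[i] > nums[i+1]:
--             if p is not None:
--                 return False
--             p = i
--
--     return (p is None or p == 0 or p == len(nums)-2 or
--             nums[p-1] <= nums[p+1] or nums[p] <= nums[p+2])
-- ===== SOURCE B (Python) =====
-- def checkPossibility2(nums):
--     # Greedy single pass: repair the first descent on the fly (tracking only the
--     # last two effective values), fail on a second descent.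
--     cnt = 0
--     pp = None      # effective value two positions back
--     prev = None    # effective previous value
--     first = True
--     for x in nums:
--         if not first and prev > x:
--             cnt += 1
--             if cnt == 2:
--                 return False
--             if pp is None or pp <= x:
--                 pp, prev = x, x        # lower prev down to x
--             else:
--                 pp = prev              # raise x up to prev; prev unchanged
--         else:
--             pp, prev = prev, x
--         first = False
--     return True
-- ===== Notes on version B (the rewrite author's own statement) =====
-- stated objective: alternative
-- what changed: B replaces A's locate-the-unique-descent-then-positional-OR-check (which indexes back into the original array at p-1..p+2) by a greedy single pass that repairs the first descent on the fly, tracking only the last two effective values and a violation counter.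
import Mathlib
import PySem

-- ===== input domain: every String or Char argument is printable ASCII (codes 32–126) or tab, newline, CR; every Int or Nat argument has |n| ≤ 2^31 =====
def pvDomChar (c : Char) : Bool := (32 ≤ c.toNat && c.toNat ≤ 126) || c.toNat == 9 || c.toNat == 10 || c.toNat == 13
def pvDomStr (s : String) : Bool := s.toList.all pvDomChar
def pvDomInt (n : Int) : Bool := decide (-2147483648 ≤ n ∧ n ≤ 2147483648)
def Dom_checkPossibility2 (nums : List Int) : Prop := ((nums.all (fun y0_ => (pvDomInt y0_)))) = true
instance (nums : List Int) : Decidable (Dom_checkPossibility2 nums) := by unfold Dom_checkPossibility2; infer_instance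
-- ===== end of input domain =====

-- B is a greedy single-pass repair (same O(n) cost, different decomposition); neither program mutates its argument.

-- ===== PORT A =====
-- A's loop over range(len(nums)-1): recursion over the suffix, carrying the current
-- element `cur` (= nums[i]), the index i, and the state p; `none` = early `return False`.
def pvALoop (cur : Int) (tail : List Int) (i : Nat) (p : Option Nat) : Option (Option Nat) :=
  match tail with
  | [] => some p
  | y :: rest =>
    if cur > y then
      match p with
      | some _ => none
      | none => pvALoop y rest (i+1) (some i)
    else pvALoop y rest (i+1) p

-- A's final return expression for `p = some p`. Python short-circuits the `or`s, so
-- nums[p-1] / nums[p+2] are only reached when in range; getD's default never affects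
-- the Boolean value (when it could fire, an earlier disjunct is already true).
def pvAFinal (nums : List Int) (p : Nat) : Bool :=
  decide (p = 0) || decide (p = nums.length - 2) ||
  decide (nums.getD (p-1) 0 ≤ nums.getD (p+1) 0) ||
  decide (nums.getD p 0 ≤ nums.getD (p+2) 0)

def checkPossibility2 (nums : List Int) : Bool :=
  match nums with
  | [] => true          -- loop body never runs, p is None
  | x :: rest =>
    match pvALoop x rest 0 none with
    | none => false
    | some none => true   -- p is None
    | some (some p) => pvAFinal nums p

-- ===== PORT B =====
-- Source B's loop: pp = effective value two back (None at the start), prev = effective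
-- previous value, cnt = violation counter; head of the list seeds prev.
def pvBGo (pp : Option Int) (prev : Int) (cnt : Nat) (xs : List Int) : Bool :=
  match xs with
  | [] => true
  | x :: rest =>
    if prev > x then
      if cnt + 1 == 2 then false
      else
        match pp with
        | none => pvBGo (some x) x (cnt+1) rest
        | some q => if q ≤ x then pvBGo (some x) x (cnt+1) rest
                    else pvBGo (some prev) prev (cnt+1) rest
    else pvBGo (some prev) x cnt rest

def checkPossibility2_alt (nums : List Int) : Bool :=
  match nums with
  | [] => true
  | x :: rest => pvBGo none x 0 rest

-- ===== PRECONDITION & SPEC =====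
def Spec_checkPossibility2 (nums : List Int) (out : Bool) : Prop := out = checkPossibility2_alt nums
instance (nums : List Int) (out : Bool) : Decidable (Spec_checkPossibility2 nums out) := by unfold Spec_checkPossibility2; infer_instance

-- ===== CLAIM (what is proved, stated in full; the proofs are below) =====
def Claim_equal_checkPossibility2 : Prop := ∀ (nums : List Int), Dom_checkPossibility2 nums → Spec_checkPossibility2 nums (checkPossibility2 nums)

-- ===== LEMMAS AND PROOFS =====

-- `true` iff prev :: xs has no descent.
def pvNoDesc (prev : Int) (xs : List Int) : Bool :=
  match xs with
  | [] => true
  | x :: rest => if prev > x then false else pvNoDesc x rest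

-- A's loop after the first descent was recorded: a further descent returns none.
lemma pvALoop_some (cur : Int) (tail : List Int) (i p0 : Nat) :
    pvALoop cur tail i (some p0)
      = (if pvNoDesc cur tail then some (some p0) else none) := by
  induction tail generalizing cur i with
  | nil => simp [pvALoop, pvNoDesc]
  | cons y rest ih =>
    simp only [pvALoop, pvNoDesc]
    by_cases h : cur > y
    · simp [h]
    · simp [h, ih]

-- B's loop with one violation already counted: any further descent fails.
lemma pvBGo_one (pp : Option Int) (prev : Int) (xs : List Int) :
    pvBGo pp prev 1 xs = pvNoDesc prev xs := by
  induction xs generalizing pp prev with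
  | nil => rfl
  | cons x rest ih =>
    by_cases h : prev > x
    · simp [pvBGo, pvNoDesc, h]
    · simp [pvBGo, pvNoDesc, h, ih]

lemma pvGetD_append (pre : List Int) (cur : Int) (tail : List Int) :
    (pre ++ cur :: tail).getD pre.length 0 = cur := by
  simp [List.getD]

lemma pvGetD_append_succ (pre : List Int) (cur y : Int) (tail : List Int) :
    (pre ++ cur :: y :: tail).getD (pre.length + 1) 0 = y := by
  have : pre ++ cur :: y :: tail = (pre ++ [cur]) ++ y :: tail := by simp
  rw [this]
  have h := pvGetD_append (pre ++ [cur]) y tail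
  simpa using h

lemma pvGetD_append_succ2 (pre : List Int) (cur y z : Int) (tail : List Int) :
    (pre ++ cur :: y :: z :: tail).getD (pre.length + 2) 0 = z := by
  have : pre ++ cur :: y :: z :: tail = (pre ++ [cur]) ++ y :: z :: tail := by simp
  rw [this]
  have h := pvGetD_append_succ (pre ++ [cur]) y z tail
  simpa [Nat.add_assoc] using h

lemma pvGetD_pred (pre : List Int) (q cur : Int) (tail : List Int)
    (h : pre.getLast? = some q) :
    (pre ++ cur :: tail).getD (pre.length - 1) 0 = q := by
  rcases List.eq_nil_or_concat pre with rfl | ⟨pre', a, rfl⟩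
  · simp at h
  · simp only [List.concat_eq_append] at h ⊢
    have ha : a = q := by simpa [List.getLast?_concat] using h
    rw [← ha]
    have e : (pre' ++ [a]) ++ cur :: tail = pre' ++ a :: (cur :: tail) := by simp
    rw [e]
    have h2 := pvGetD_append pre' a (cur :: tail)
    simpa using h2

-- Clean phase: no descent seen yet; pp is the last element of the consumed prefix.
lemma pvMain (tail : List Int) : ∀ (pre : List Int) (cur : Int),
    (match pvALoop cur tail pre.length none with
     | none => false
     | some none => true
     | some (some p) => pvAFinal (pre ++ cur :: tail) p)
      = pvBGo pre.getLast? cur 0 tail := by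
  induction tail with
  | nil => intro pre cur; simp [pvALoop, pvBGo]
  | cons y rest ih =>
    intro pre cur
    by_cases hxy : cur > y
    · -- first descent found at index pre.length
      simp only [pvALoop, if_pos hxy]
      rw [pvALoop_some]
      cases hpp : pre.getLast? with
      | none =>
        -- pre = [], so p = 0 and pvAFinal is true
        have hpre : pre = [] := by
          cases pre with
          | nil => rfl
          | cons a l =>
            exact absurd (List.getLast?_isSome.mpr (by simp) : (a::l).getLast?.isSome)
              (by simp [hpp])
        subst hpre
        have hB : pvBGo (none : Option Int) cur 0 (y :: rest) = pvBGo (some y) y 1 rest := by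
          simp [pvBGo, hxy]
        rw [hB, pvBGo_one]
        cases hnd : pvNoDesc y rest <;> simp [hnd, pvAFinal]
      | some q =>
        by_cases hq : q ≤ y
        · -- repair by lowering: pvAFinal true via nums[p-1] ≤ nums[p+1]
          have hB : pvBGo (some q) cur 0 (y :: rest) = pvBGo (some y) y 1 rest := by
            simp [pvBGo, hxy, hq]
          rw [hB, pvBGo_one]
          have h1 := pvGetD_pred pre q cur (y :: rest) hpp
          have h2 := pvGetD_append_succ pre cur y rest
          simp only [List.getD] at h1 h2
          cases hnd : pvNoDesc y rest <;> simp [hnd, pvAFinal, h1, h2, hq]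
        · -- repair by raising: result hinges on rest and cur vs head of rest
          have hB : pvBGo (some q) cur 0 (y :: rest) = pvBGo (some cur) cur 1 rest := by
            simp [pvBGo, hxy, hq]
          rw [hB, pvBGo_one]
          have hpre_ne : pre ≠ [] := by intro h; subst h; simp at hpp
          have hp0 : pre.length ≠ 0 := by
            simpa [List.length_eq_zero_iff] using hpre_ne
          have h1 := pvGetD_pred pre q cur (y :: rest) hpp
          have h2 := pvGetD_append_succ pre cur y rest
          simp only [List.getD] at h1 h2
          cases rest with
          | nil =>
            -- p = len(nums) - 2: pvAFinal true; both sides true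
            have hplen : pre.length = (pre ++ cur :: y :: []).length - 2 := by
              simp [List.length_append]
            simp [pvNoDesc, pvAFinal, ← hplen]
          | cons z rest' =>
            have h3 := pvGetD_append_succ2 pre cur y z rest'
            simp only [List.getD] at h3
            have hplen : pre.length ≠ (pre ++ cur :: y :: z :: rest').length - 2 := by
              simp [List.length_append]; omega
            by_cases hcz : cur ≤ z
            · have hyz : ¬ (y > z) := by omega
              have hAf : pvAFinal (pre ++ cur :: y :: z :: rest') pre.length = true := by
                simp [pvAFinal, h3, hcz]
              simp [pvNoDesc, hyz, hcz, hAf, if_neg (show ¬ cur > z by omega)]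
              cases hnd : pvNoDesc z rest' <;> simp [hnd, hAf]
            · -- cur > z: both sides false
              have hAf : pvAFinal (pre ++ cur :: y :: z :: rest') pre.length = false := by
                simp [pvAFinal, hplen, h1, h2, h3, hq, hp0, List.length_eq_zero_iff.not.mpr hpre_ne]
                omega
              simp only [pvNoDesc, if_pos (show cur > z by omega)]
              split_ifs with h <;> simp [hAf]
    · -- no descent here: advance, prefix grows by cur
      simp only [pvALoop, pvBGo, if_neg hxy]
      have := ih (pre ++ [cur]) y
      simpa [List.getLast?_concat, Nat.add_comm] using this

-- ===== VERDICT (by name: the statement is the Claim_ definition above) =====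
theorem checkPossibility2_spec : Claim_equal_checkPossibility2 := by
  intro nums _
  unfold Spec_checkPossibility2
  cases nums with
  | nil => rfl
  | cons x rest =>
    have h := pvMain rest [] x
    simpa [checkPossibility2, checkPossibility2_alt] using h
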